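-- pv_equiv track=rewrite | github.com/terzotian/RAGagent | code/code/libs/mineru_vl_utils/post_process/equation_unbalanced_braces.py | try_fix_unbalanced_braces
-- ===== SOURCE A (Python) =====
-- def try_fix_unbalanced_braces(latex_formula: str, debug: bool = False):
--     """
--     检测LaTeX公式中的花括号是否闭合，并删除无法配对的花括号
--
--     Args:
--         latex_formula (str): 输入的LaTeX公式
--
--     Returns:
--         str: 删除无法配对的花括号后的LaTeX公式
--     """
--     stack = []  # 存储左括号的索引
--     unmatched = set()  # 存储不匹配括号的索引
--     i = 0
--
--     while i < len(latex_formula):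
--         # 检查是否是转义的花括号
--         if latex_formula[i] in ['{', '}']:
--             # 计算前面连续的反斜杠数量
--             backslash_count = 0
--             j = i - 1
--             while j >= 0 and latex_formula[j] == '\\':
--                 backslash_count += 1
--                 j -= 1
--
--             # 如果前面有奇数个反斜杠，则该花括号是转义的，不参与匹配
--             if backslash_count % 2 == 1:
--                 i += 1
--                 continue
--
--             # 否则，该花括号参与匹配
--             if latex_formula[i] == '{':
--                 stack.append(i)
--             else:  # latex_formula[i] == '}'
--                 if stack:  # 有对应的左括号
--                     stack.pop()
--                 else:  # 没有对应的左括号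
--                     unmatched.add(i)
--
--         i += 1
--
--     # 所有未匹配的左括号
--     unmatched.update(stack)
--
--     # 构建新字符串，删除不匹配的括号
--     return ''.join(char for i, char in enumerate(latex_formula) if i not in unmatched)
-- ===== SOURCE B (Python) =====
-- def try_fix_unbalanced_braces(latex_formula: str, debug: bool = False):
--     """Single pass: maintain the running count of consecutive backslashes
--     instead of rescanning backwards at every brace."""
--     stack = []      # indices of pending unescaped '{'
--     drop = set()    # indices of unmatched '}'
--     run = 0         # consecutive backslashes immediately before current char
--     for i, ch in enumerate(latex_formula):
--         if ch == '\\':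
--             run += 1
--             continue
--         if run % 2 == 0:
--             if ch == '{':
--                 stack.append(i)
--             elif ch == '}':
--                 if stack:
--                     stack.pop()
--                 else:
--                     drop.add(i)
--         run = 0
--     drop.update(stack)
--     return ''.join(ch for i, ch in enumerate(latex_formula) if i not in drop)
-- ===== Notes on version B (the rewrite author's own statement) =====
-- stated objective: alternative
-- what changed: Replaced A's per-brace backward rescan for preceding backslashes with a running consecutive-backslash counter maintained in one forward pass.
import Mathlib
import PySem

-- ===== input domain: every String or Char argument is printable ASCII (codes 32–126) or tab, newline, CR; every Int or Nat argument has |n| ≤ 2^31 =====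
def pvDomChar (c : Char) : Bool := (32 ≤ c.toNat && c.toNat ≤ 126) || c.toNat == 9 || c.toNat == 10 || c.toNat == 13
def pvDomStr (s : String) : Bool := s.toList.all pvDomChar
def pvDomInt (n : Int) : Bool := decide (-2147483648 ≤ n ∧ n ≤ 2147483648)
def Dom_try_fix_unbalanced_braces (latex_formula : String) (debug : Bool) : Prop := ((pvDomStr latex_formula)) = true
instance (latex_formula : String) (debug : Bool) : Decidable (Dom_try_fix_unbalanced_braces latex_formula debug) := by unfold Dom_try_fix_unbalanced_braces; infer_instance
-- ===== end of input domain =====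

-- B replaces A's per-brace backward rescan for preceding backslashes by a running
-- consecutive-backslash counter maintained in a single forward pass (objective: alternative).

-- ===== PORT A =====
-- inner while loop of A: number of consecutive backslashes immediately before index i
def pvCountBS (cs : List Char) : Nat → Nat
  | 0 => 0
  | j + 1 => if cs.getD j ' ' == '\\' then pvCountBS cs j + 1 else 0

-- A's outer while loop over index i, carrying (stack, unmatched)
def pvALoop (cs : List Char) (i : Nat) (stack : List Int) (un : PySem.Set Int) :
    List Int × PySem.Set Int :=
  if h : i < cs.length then
    let c := cs.getD i ' '
    if c == '{' || c == '}' then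
      if pvCountBS cs i % 2 == 1 then
        pvALoop cs (i + 1) stack un
      else if c == '{' then
        pvALoop cs (i + 1) (stack ++ [(i : Int)]) un
      else if stack.isEmpty then
        pvALoop cs (i + 1) stack (PySem.Set.add un (i : Int))
      else
        pvALoop cs (i + 1) stack.dropLast un
    else
      pvALoop cs (i + 1) stack un
  else
    (stack, un)
termination_by cs.length - i

def try_fix_unbalanced_braces (latex_formula : String) (debug : Bool) : String :=
  let cs := latex_formula.toList
  let r := pvALoop cs 0 [] PySem.Set.empty
  let un := PySem.Set.update r.2 r.1
  String.ofList (((PySem.List.enumerate cs 0).filter (fun p => !(PySem.Set.contains un p.1))).map (·.2))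

-- ===== PORT B =====
-- B's single forward pass: run = consecutive backslashes immediately before current char
def pvBLoop (rest : List Char) (i : Nat) (run : Nat) (stack : List Int) (un : PySem.Set Int) :
    List Int × PySem.Set Int :=
  match rest with
  | [] => (stack, un)
  | c :: rest' =>
    if c == '\\' then
      pvBLoop rest' (i + 1) (run + 1) stack un
    else
      let s : List Int × PySem.Set Int :=
        if run % 2 == 0 then
          if c == '{' then (stack ++ [(i : Int)], un)
          else if c == '}' then
            if stack.isEmpty then (stack, PySem.Set.add un (i : Int))
            else (stack.dropLast, un)
          else (stack, un)
        else (stack, un)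
      pvBLoop rest' (i + 1) 0 s.1 s.2

def try_fix_unbalanced_braces_alt (latex_formula : String) (debug : Bool) : String :=
  let cs := latex_formula.toList
  let r := pvBLoop cs 0 0 [] PySem.Set.empty
  let un := PySem.Set.update r.2 r.1
  String.ofList (((PySem.List.enumerate cs 0).filter (fun p => !(PySem.Set.contains un p.1))).map (·.2))

-- ===== PRECONDITION & SPEC =====
def Spec_try_fix_unbalanced_braces (latex_formula : String) (debug : Bool) (out : String) : Prop := out = try_fix_unbalanced_braces_alt latex_formula debug
instance (latex_formula : String) (debug : Bool) (out : String) : Decidable (Spec_try_fix_unbalanced_braces latex_formula debug out) := by unfold Spec_try_fix_unbalanced_braces; infer_instance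

-- ===== CLAIM (what is proved, stated in full; the proofs are below) =====
def Claim_equal_try_fix_unbalanced_braces : Prop := ∀ (latex_formula : String) (debug : Bool), Dom_try_fix_unbalanced_braces latex_formula debug → Spec_try_fix_unbalanced_braces latex_formula debug (try_fix_unbalanced_braces latex_formula debug)

-- ===== LEMMAS AND PROOFS =====

lemma pvCountBS_succ (cs : List Char) (i : Nat) :
    pvCountBS cs (i + 1) = if cs.getD i ' ' == '\\' then pvCountBS cs i + 1 else 0 := rfl

lemma loop_eq (cs : List Char) : ∀ n i stack un, cs.length - i = n →
    pvALoop cs i stack un = pvBLoop (cs.drop i) i (pvCountBS cs i) stack un := by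
  intro n
  induction n with
  | zero =>
    intro i stack un hn
    have hge : cs.length ≤ i := by omega
    rw [List.drop_eq_nil_of_le hge]
    rw [pvALoop]
    simp [Nat.not_lt_of_le hge, pvBLoop]
  | succ n ih =>
    intro i stack un hn
    by_cases h : i < cs.length
    · have hdrop : cs.drop i = cs[i] :: cs.drop (i + 1) :=
        (List.getElem_cons_drop h).symm
      have hgetD : cs.getD i ' ' = cs[i] := List.getD_eq_getElem cs ' ' h
      have hrec : cs.length - (i + 1) = n := by omega
      rw [pvALoop, dif_pos h, hdrop, pvBLoop]
      simp only [hgetD]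
      by_cases hbs : cs[i] = '\\'
      · -- backslash: not a brace in A; run + 1 in B
        have hcount : pvCountBS cs (i + 1) = pvCountBS cs i + 1 := by
          rw [pvCountBS_succ, hgetD, hbs]; simp
        rw [hbs]
        have cA : ¬((('\\' : Char) == '{' || ('\\' : Char) == '}') = true) := by decide
        have cB : ((('\\' : Char) == '\\') = true) := by decide
        simp only [if_neg cA, if_pos cB]
        rw [ih (i + 1) stack un hrec, hcount]
      · have hcount0 : pvCountBS cs (i + 1) = 0 := by
          rw [pvCountBS_succ, hgetD]; simp [hbs]
        by_cases hob : cs[i] = '{'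
        · rw [hob]
          have cA : ((('{' : Char) == '{' || ('{' : Char) == '}') = true) := by decide
          have cB : ¬((('{' : Char) == '\\') = true) := by decide
          have cC : ((('{' : Char) == '{') = true) := by decide
          by_cases hpar : pvCountBS cs i % 2 = 1
          · have hp1 : ((pvCountBS cs i % 2 == 1) = true) := by simpa using hpar
            have hp0 : ¬((pvCountBS cs i % 2 == 0) = true) := by simp; omega
            simp only [if_pos cA, if_neg cB, if_pos cC, if_pos hp1, if_neg hp0]
            rw [ih (i + 1) stack un hrec, hcount0]
          · have hp1 : ¬((pvCountBS cs i % 2 == 1) = true) := by simpa using hpar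
            have hp0 : ((pvCountBS cs i % 2 == 0) = true) := by simp; omega
            simp only [if_pos cA, if_neg cB, if_pos cC, if_neg hp1, if_pos hp0]
            rw [ih (i + 1) (stack ++ [(i : Int)]) un hrec, hcount0]
        · by_cases hcb : cs[i] = '}'
          · rw [hcb]
            have cA : ((('}' : Char) == '{' || ('}' : Char) == '}') = true) := by decide
            have cB : ¬((('}' : Char) == '\\') = true) := by decide
            have cC : ¬((('}' : Char) == '{') = true) := by decide
            have cD : ((('}' : Char) == '}') = true) := by decide
            by_cases hpar : pvCountBS cs i % 2 = 1
            · have hp1 : ((pvCountBS cs i % 2 == 1) = true) := by simpa using hpar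
              have hp0 : ¬((pvCountBS cs i % 2 == 0) = true) := by simp; omega
              simp only [if_pos cA, if_neg cB, if_neg cC, if_pos cD, if_pos hp1, if_neg hp0]
              rw [ih (i + 1) stack un hrec, hcount0]
            · have hp1 : ¬((pvCountBS cs i % 2 == 1) = true) := by simpa using hpar
              have hp0 : ((pvCountBS cs i % 2 == 0) = true) := by simp; omega
              by_cases hst : stack.isEmpty
              · simp only [if_pos cA, if_neg cB, if_neg cC, if_pos cD, if_neg hp1,
                  if_pos hp0, if_pos hst]
                rw [ih (i + 1) stack (PySem.Set.add un (i : Int)) hrec, hcount0]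
              · simp only [if_pos cA, if_neg cB, if_neg cC, if_pos cD, if_neg hp1,
                  if_pos hp0, if_neg hst]
                rw [ih (i + 1) stack.dropLast un hrec, hcount0]
          · -- any other character: A skips it, B resets the run to 0
            have hA : ¬((cs[i] == '{' || cs[i] == '}') = true) := by simp [hob, hcb]
            have hBf : ¬((cs[i] == '\\') = true) := by simp [hbs]
            have hB1 : ¬((cs[i] == '{') = true) := by simp [hob]
            have hB2 : ¬((cs[i] == '}') = true) := by simp [hcb]
            simp only [if_neg hA, if_neg hBf, if_neg hB1, if_neg hB2, ite_self]
            rw [ih (i + 1) stack un hrec, hcount0]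
    · omega

-- ===== VERDICT (by name: the statement is the Claim_ definition above) =====
theorem try_fix_unbalanced_braces_spec : Claim_equal_try_fix_unbalanced_braces := by
  intro latex_formula debug _
  unfold Spec_try_fix_unbalanced_braces try_fix_unbalanced_braces try_fix_unbalanced_braces_alt
  dsimp only
  rw [loop_eq latex_formula.toList latex_formula.toList.length 0 [] PySem.Set.empty rfl]
  rfl
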